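-- pv_equiv track=rewrite | github.com/nawaranasser/LFSR | linear feedback shift register.py | encryption
-- ===== SOURCE A (Python) =====
-- from operator import xor
--
-- def txt_to_ascii(txt):
--     ascii_list = []
--     for char in txt:
--         ascii_list.append(ord(char))
--     return ascii_list
--
-- def shifting(initial_vector):
--     shifted_reg = initial_vector.copy()
--     shifted_reg.insert(0, 0)
--     shifted_reg.pop()
--     return shifted_reg
--
-- def xoring(poly, vec):
--     feedback_bit = vec[poly[0]]
--     for x in range(1, len(poly)):
--         feedback_bit = xor(feedback_bit, vec[poly[x]])
--     return feedback_bit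
--
-- def getKey(initial_vector):
--     shifted_reg = initial_vector.copy()
--     shifted_reg.insert(0, 0)
--     pop_bit = shifted_reg.pop()
--     return pop_bit
--
-- def lfsr(initial_vector, poly, m):
--     num_clk = (2 ** m)
--     key = []
--     for i in range(num_clk):
--         if i == 0:
--             shifted_vector = shifting(initial_vector)
--             feedback = xoring(poly, initial_vector)
--             shifted_vector[0] = feedback
--             k = getKey(initial_vector)
--             key.append(k)
--         else:
--             shifted_vector = shifting(shifted_vector)
--             feedback = xoring(poly, shifted_vector)
--             shifted_vector[0] = feedback
--             k = getKey(shifted_vector)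
--             key.append(k)
--     return key
--
-- def encryption(plain_txt_):
--     plain_txt_ = txt_to_ascii(plain_txt_)
--     key = lfsr([1, 0, 0], [1, 2], 3)
--     for _ in range(len(plain_txt_)):
--         if len(key) <= len(plain_txt_):
--             key = key + key
--     cipher_txt = []
--     for bit in range(len(plain_txt_)):
--         cipher_txt.append(xor(plain_txt_[bit], key[bit]))
--     return cipher_txt
-- ===== SOURCE B (Python) =====
-- def encryption(plain_txt_):
--     # 3-bit LFSR register kept as one integer (bit 2 = leftmost cell), taps at cells 1 and 2.
--     r = 0b100
--     # First clock: feedback is read from the unshifted register and the output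
--     # bit is its last cell; afterwards every clock shifts first.
--     key = [r & 1]
--     r = ((((r >> 1) ^ r) & 1) << 2) | (r >> 1)
--     for _ in range(7):
--         key.append((r >> 1) & 1)
--         r = ((((r >> 2) ^ (r >> 1)) & 1) << 2) | (r >> 1)
--     # The 8-bit keystream tiles the text: cipher[i] = ord(text[i]) ^ key[i % 8].
--     return [ord(ch) ^ key[i % 8] for i, ch in enumerate(plain_txt_)]
-- ===== Notes on version B (the rewrite author's own statement) =====
-- stated objective: alternative
-- what changed: B keeps the LFSR state as a single integer stepped with shifts/masks instead of list insert/pop/copy/setitem, and replaces A's key-doubling loop (key = key + key until it covers the text) plus index loop by one comprehension that tiles the fixed 8-bit keystream with i % 8.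
import Mathlib
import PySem

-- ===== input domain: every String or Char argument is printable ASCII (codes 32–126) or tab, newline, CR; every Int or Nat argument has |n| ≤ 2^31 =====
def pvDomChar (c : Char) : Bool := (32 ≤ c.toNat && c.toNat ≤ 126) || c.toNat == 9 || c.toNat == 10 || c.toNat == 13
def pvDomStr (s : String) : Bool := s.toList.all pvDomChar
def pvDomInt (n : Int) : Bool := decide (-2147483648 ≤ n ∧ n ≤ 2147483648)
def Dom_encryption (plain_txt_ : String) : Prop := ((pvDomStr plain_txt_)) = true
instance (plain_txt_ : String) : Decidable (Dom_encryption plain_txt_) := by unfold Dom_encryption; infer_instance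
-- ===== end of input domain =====

-- B rewrites the LFSR with an integer register (shifts/masks) and tiles the fixed 8-bit
-- keystream with i % 8 instead of repeatedly doubling the key list (objective: alternative).

-- ===== PORT A =====
def txtToAscii (txt : String) : List Int :=
  txt.toList.foldl (fun acc c => acc ++ [(c.toNat : Int)]) []

-- insert(0, 0) then pop(): the popped element is the last of the (nonempty) list
def shiftingA (v : List Int) : List Int := ((0 : Int) :: v).dropLast

-- all indices are in range in A's use of xoring, so pyGetD with default 0 is exact there
def xoringA (poly vec : List Int) : Int :=
  (PySem.List.pyRange 1 (poly.length : Int) 1).foldl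
    (fun fb x => PySem.Int.bxor fb (PySem.List.pyGetD vec (PySem.List.pyGetD poly x 0) 0))
    (PySem.List.pyGetD vec (PySem.List.pyGetD poly 0 0) 0)

-- insert(0, 0) then pop(): returns the last element of the (nonempty) list
def getKeyA (v : List Int) : Int := ((0 : Int) :: v).getLastD 0

-- 2 ** m : exact for 0 ≤ m, which holds at A's only call (m = 3)
def lfsrA (initialVector poly : List Int) (m : Int) : List Int :=
  let numClk : Int := 2 ^ m.toNat
  ((PySem.List.pyRange 0 numClk 1).foldl
    (fun (st : List Int × List Int) i =>
      if i == 0 then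
        let sv := shiftingA initialVector
        let fb := xoringA poly initialVector
        let sv := PySem.List.pySetD sv 0 fb
        let k := getKeyA initialVector
        (sv, st.2 ++ [k])
      else
        let sv := shiftingA st.1
        let fb := xoringA poly sv
        let sv := PySem.List.pySetD sv 0 fb
        let k := getKeyA sv
        (sv, st.2 ++ [k]))
    ([], [])).2

def encryption (plain_txt_ : String) : List Int :=
  let plain := txtToAscii plain_txt_
  let key0 := lfsrA [1, 0, 0] [1, 2] 3
  let key := (PySem.List.pyRange 0 (plain.length : Int) 1).foldl
    (fun key _ => if key.length ≤ plain.length then key ++ key else key) key0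
  (PySem.List.pyRange 0 (plain.length : Int) 1).foldl
    (fun acc bit => acc ++ [PySem.Int.bxor (PySem.List.pyGetD plain bit 0) (PySem.List.pyGetD key bit 0)]) []

-- ===== PORT B =====
def encryption_alt (plain_txt_ : String) : List Int :=
  let r0 : Int := 4
  let key0 : List Int := [PySem.Int.band r0 1]
  let r1 : Int := PySem.Int.bor ((PySem.Int.band (PySem.Int.bxor (r0 >>> 1) r0) 1) <<< 2) (r0 >>> 1)
  let key := ((List.range 7).foldl
    (fun (st : List Int × Int) _ =>
      (st.1 ++ [PySem.Int.band (st.2 >>> 1) 1],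
       PySem.Int.bor ((PySem.Int.band (PySem.Int.bxor (st.2 >>> 2) (st.2 >>> 1)) 1) <<< 2) (st.2 >>> 1)))
    (key0, r1)).1
  (PySem.List.enumerate plain_txt_.toList).map
    (fun p => PySem.Int.bxor ((p.2.toNat : Int)) (PySem.List.pyGetD key (PySem.Int.mod p.1 8) 0))

-- ===== PRECONDITION & SPEC =====
def Spec_encryption (plain_txt_ : String) (out : List Int) : Prop := out = encryption_alt plain_txt_
instance (plain_txt_ : String) (out : List Int) : Decidable (Spec_encryption plain_txt_ out) := by unfold Spec_encryption; infer_instance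

-- ===== CLAIM (what is proved, stated in full; the proofs are below) =====
def Claim_equal_encryption : Prop := ∀ (plain_txt_ : String), Dom_encryption plain_txt_ → Spec_encryption plain_txt_ (encryption plain_txt_)

-- ===== LEMMAS AND PROOFS =====

-- the 8-bit keystream both programs produce
def pvBase : List Int := [0, 1, 0, 1, 1, 0, 1, 1]

lemma lfsrA_eval : lfsrA [1, 0, 0] [1, 2] 3 = pvBase := by decide

lemma altKey_eval :
    (((List.range 7).foldl
      (fun (st : List Int × Int) _ =>
        (st.1 ++ [PySem.Int.band (st.2 >>> 1) 1],
         PySem.Int.bor ((PySem.Int.band (PySem.Int.bxor (st.2 >>> 2) (st.2 >>> 1)) 1) <<< 2) (st.2 >>> 1)))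
      ([PySem.Int.band 4 1],
       PySem.Int.bor ((PySem.Int.band (PySem.Int.bxor ((4 : Int) >>> 1) 4) 1) <<< 2) ((4 : Int) >>> 1))).1 : List Int)
    = pvBase := by decide

-- pvRep m = m copies of the keystream, the shape A's doubling loop maintains
def pvRep : Nat → List Int
  | 0 => []
  | m + 1 => pvBase ++ pvRep m

lemma pvRep_length (m : Nat) : (pvRep m).length = 8 * m := by
  induction m with
  | zero => rfl
  | succ m ih => simp only [pvRep, List.length_append, ih, pvBase, List.length_cons,
      List.length_nil]; omega

lemma pvRep_add (a b : Nat) : pvRep (a + b) = pvRep a ++ pvRep b := by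
  induction a with
  | zero => simp [pvRep]
  | succ a ih => simp [pvRep, Nat.succ_add, ih]

lemma pvBase_length : pvBase.length = 8 := by decide

lemma pvRep_getD (m i : Nat) (h : i < 8 * m) :
    (pvRep m).getD i 0 = pvBase.getD (i % 8) 0 := by
  induction m generalizing i with
  | zero => omega
  | succ m ih =>
    by_cases hi : i < 8
    · simp only [pvRep]
      rw [List.getD_append _ _ _ _ (by rw [pvBase_length]; omega), Nat.mod_eq_of_lt hi]
    · simp only [pvRep]
      rw [List.getD_append_right _ _ _ _ (by rw [pvBase_length]; omega), pvBase_length,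
        ih (i - 8) (by omega)]
      congr 1
      omega

lemma double_stable (l : List Int) (n m : Nat) (h : n < 8 * m) :
    l.foldl (fun key (_ : Int) => if key.length ≤ n then key ++ key else key) (pvRep m) = pvRep m := by
  induction l with
  | nil => rfl
  | cons x l ih =>
    rw [List.foldl_cons]
    simp only [if_neg (by rw [pvRep_length]; omega : ¬ (pvRep m).length ≤ n)]
    exact ih

lemma double_invariant (l : List Int) (n m : Nat) (hm : 0 < m) :
    ∃ m', 0 < m' ∧
      l.foldl (fun key (_ : Int) => if key.length ≤ n then key ++ key else key) (pvRep m) = pvRep m' ∧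
      (n < 8 * m' ∨ 2 ^ l.length * m ≤ m') := by
  induction l generalizing m with
  | nil => exact ⟨m, hm, rfl, Or.inr (by simp)⟩
  | cons x l ih =>
    by_cases hle : 8 * m ≤ n
    · obtain ⟨m', hm', heq, hd⟩ := ih (2 * m) (by omega)
      refine ⟨m', hm', ?_, ?_⟩
      · rw [List.foldl_cons]
        simp only [if_pos (by rw [pvRep_length]; omega : (pvRep m).length ≤ n)]
        rw [show pvRep m ++ pvRep m = pvRep (2 * m) by rw [two_mul, pvRep_add]]
        exact heq
      · rcases hd with h | h
        · exact Or.inl h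
        · right
          calc 2 ^ (x :: l).length * m = 2 ^ l.length * (2 * m) := by
                rw [List.length_cons, pow_succ]; ring
            _ ≤ m' := h
    · have hlt : n < 8 * m := by omega
      refine ⟨m, hm, ?_, Or.inl hlt⟩
      rw [List.foldl_cons]
      simp only [if_neg (by rw [pvRep_length]; omega : ¬ (pvRep m).length ≤ n)]
      exact double_stable l n m hlt

lemma double_covers (l : List Int) (n : Nat) (hlen : l.length = n) :
    ∃ m', 0 < m' ∧ n < 8 * m' ∧
      l.foldl (fun key (_ : Int) => if key.length ≤ n then key ++ key else key) (pvRep 1) = pvRep m' := by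
  obtain ⟨m', hm', heq, hd⟩ := double_invariant l n 1 (by omega)
  refine ⟨m', hm', ?_, heq⟩
  rcases hd with h | h
  · exact h
  · have hp : n < 2 ^ n := Nat.lt_two_pow_self
    have h' : 2 ^ n ≤ m' := by simpa [hlen] using h
    omega

lemma pvRep_one : pvRep 1 = pvBase := by simp [pvRep]

lemma txtToAscii_eq (txt : String) : txtToAscii txt = txt.toList.map (fun c => (c.toNat : Int)) := by
  simpa [txtToAscii] using
    PySem.List.foldl_append_singleton_eq_map (fun c : Char => (c.toNat : Int)) txt.toList []

lemma mod8_natCast (s : Nat) : PySem.Int.mod (s : Int) 8 = ((s % 8 : Nat) : Int) := by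
  exact_mod_cast PySem.Int.mod_natCast s 8

-- A's result in closed form: xor each code with the keystream tiled mod 8
lemma A_eval (txt : String) : encryption txt =
    (List.range txt.toList.length).map (fun k =>
      PySem.Int.bxor ((txt.toList.map (fun c => (c.toNat : Int))).getD k 0) (pvBase.getD (k % 8) 0)) := by
  simp only [encryption]
  rw [txtToAscii_eq, lfsrA_eval]
  simp only [List.length_map]
  obtain ⟨M, hM0, hMn, hkey⟩ := double_covers (PySem.List.pyRange 0 (txt.toList.length : Int) 1)
    txt.toList.length (by rw [PySem.List.length_pyRange_one]; omega)
  rw [pvRep_one] at hkey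
  rw [hkey]
  rw [PySem.List.foldl_append_singleton_eq_map
    (fun bit => PySem.Int.bxor (PySem.List.pyGetD (txt.toList.map (fun c => (c.toNat : Int))) bit 0)
      (PySem.List.pyGetD (pvRep M) bit 0))]
  rw [PySem.List.pyRange_zero_nat, List.map_map, List.nil_append]
  refine List.map_congr_left (fun k hk => ?_)
  simp only [Function.comp_apply, PySem.List.pyGetD_natCast]
  congr 1
  exact pvRep_getD M k (lt_trans (List.mem_range.mp hk) hMn)

-- B's map over enumerate, as a map over List.range (generalizing the start offset)
lemma alt_map_enumerate (cs : List Char) (s : Nat) :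
    (PySem.List.enumerate cs (s : Int)).map
      (fun p => PySem.Int.bxor ((p.2.toNat : Int)) (PySem.List.pyGetD pvBase (PySem.Int.mod p.1 8) 0))
    = (List.range cs.length).map (fun k =>
      PySem.Int.bxor (((cs.map (fun c => (c.toNat : Int))).getD k 0)) (pvBase.getD ((s + k) % 8) 0)) := by
  induction cs generalizing s with
  | nil => simp [PySem.List.enumerate_nil]
  | cons c cs ih =>
    rw [PySem.List.enumerate_cons, List.map_cons,
      show (s : Int) + 1 = ((s + 1 : Nat) : Int) by push_cast; ring, ih (s + 1),
      List.length_cons, List.range_succ_eq_map, List.map_cons, List.map_map]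
    congr 1
    · rw [show PySem.Int.mod (s : Int) 8 = ((s % 8 : Nat) : Int) from mod8_natCast s,
        PySem.List.pyGetD_natCast]
      simp
    · refine List.map_congr_left (fun k _ => ?_)
      simp only [Function.comp_apply, List.map_cons, List.getD_cons_succ]
      congr 2
      omega

lemma B_eval (txt : String) : encryption_alt txt =
    (List.range txt.toList.length).map (fun k =>
      PySem.Int.bxor ((txt.toList.map (fun c => (c.toNat : Int))).getD k 0) (pvBase.getD (k % 8) 0)) := by
  simp only [encryption_alt]
  rw [altKey_eval]
  have h := alt_map_enumerate txt.toList 0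
  simpa using h

-- ===== VERDICT (by name: the statement is the Claim_ definition above) =====
theorem encryption_spec : Claim_equal_encryption := by
  intro txt _
  unfold Spec_encryption
  rw [A_eval, B_eval]
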